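-- pv_equiv track=rewrite | github.com/GeorgeMLP/reasoning-probing | reasoning_features/scripts/visualize_injection_features.py | get_token_sequences_from_reasoning_texts
-- ===== SOURCE A (Python) =====
-- def get_token_sequences_from_reasoning_texts(
--     reasoning_texts: list[str],
--     target_tokens: list[str],
-- ) -> dict[str, dict[str, list[str]]]:
--     """Extract bigrams, trigrams, and contextual patterns from reasoning texts.
--
--     For each target token, extracts:
--     - before: Tokens that appear immediately before the target
--     - after: Tokens that appear immediately after the target
--
--     Args:
--         reasoning_texts: List of reasoning texts to analyze
--         target_tokens: Tokens to find contexts for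
--
--     Returns:
--         Dict mapping token -> {"before": [words], "after": [words]}
--     """
--     from collections import Counter
--
--     # Normalize target tokens for matching
--     target_set = {t.strip().lower() for t in target_tokens}
--
--     # Count contexts
--     token_contexts = {token: {"before": Counter(), "after": Counter()} for token in target_tokens}
--
--     for text in reasoning_texts:
--         words = text.split()
--         for i, word in enumerate(words):
--             # Normalize word for matching
--             normalized = word.strip('.,!?;:').lower()
--
--             # Check if any target token matches
--             for target in target_tokens:
--                 if normalized == target.strip().lower():
--                     # Extract preceding tokens
--                     if i > 0:
--                         prev_word = words[i-1].strip('.,!?;:').lower()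
--                         token_contexts[target]["before"][prev_word] += 1
--
--                     # Extract following tokens
--                     if i < len(words) - 1:
--                         next_word = words[i+1].strip('.,!?;:').lower()
--                         token_contexts[target]["after"][next_word] += 1
--
--     # Convert Counters to sorted lists (most common first)
--     result = {}
--     for token in target_tokens:
--         result[token] = {
--             "before": [tok for tok, _ in token_contexts[token]["before"].most_common(10)],
--             "after": [tok for tok, _ in token_contexts[token]["after"].most_common(10)],
--         }
--
--     return result
-- ===== SOURCE B (Python) =====
-- def get_token_sequences_from_reasoning_texts(
--     reasoning_texts: list[str],
--     target_tokens: list[str],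
-- ) -> dict[str, dict[str, list[str]]]:
--     """Two-phase: build one global bigram table over adjacent normalized words,
--     then read each target's before/after neighbor rankings off that table."""
--     from collections import Counter
--
--     # Phase 1: single corpus pass, no per-target state at all.
--     bigrams = Counter()
--     for text in reasoning_texts:
--         nws = [w.strip('.,!?;:').lower() for w in text.split()]
--         bigrams.update(zip(nws, nws[1:]))
--
--     # Phase 2: extraction — project the pair table onto each target's normal form.
--     result = {}
--     for token in target_tokens:
--         nf = token.strip().lower()
--         before = Counter({l: c for (l, r), c in bigrams.items() if r == nf})
--         after = Counter({r: c for (l, r), c in bigrams.items() if l == nf})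
--         result[token] = {
--             "before": [w for w, _ in before.most_common(10)],
--             "after": [w for w, _ in after.most_common(10)],
--         }
--     return result
-- ===== Notes on version B (the rewrite author's own statement) =====
-- stated objective: faster
-- what changed: B replaces A's per-word inner scan over all targets updating per-target mutable counters by a two-phase algorithm: one corpus pass builds a single global bigram Counter over adjacent normalized word pairs (no per-target state), and a separate extraction phase projects that pair table onto each target's normalized form and takes most_common(10).
import Mathlib
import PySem

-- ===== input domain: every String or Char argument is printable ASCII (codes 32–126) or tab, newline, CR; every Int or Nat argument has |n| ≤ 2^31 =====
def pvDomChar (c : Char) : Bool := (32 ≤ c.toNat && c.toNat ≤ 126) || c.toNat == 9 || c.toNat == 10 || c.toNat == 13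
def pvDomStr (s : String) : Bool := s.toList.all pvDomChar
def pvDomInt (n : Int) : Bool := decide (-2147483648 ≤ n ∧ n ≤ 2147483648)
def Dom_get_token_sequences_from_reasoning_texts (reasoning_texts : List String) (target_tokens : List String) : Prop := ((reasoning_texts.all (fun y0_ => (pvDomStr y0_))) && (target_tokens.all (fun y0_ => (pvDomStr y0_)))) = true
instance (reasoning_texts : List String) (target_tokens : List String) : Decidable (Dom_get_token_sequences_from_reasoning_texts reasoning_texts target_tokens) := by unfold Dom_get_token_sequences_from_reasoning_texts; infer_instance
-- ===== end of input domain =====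

-- B replaces A's per-word inner scan over all targets (mutable per-target counters) by a
-- two-phase algorithm: one global bigram table over adjacent normalized word pairs, then an
-- extraction phase projecting that table onto each target's normal form (objective: faster; no per-target inner loop).

-- ===== PORT A =====
-- word.strip('.,!?;:').lower()
def pvNormWord (w : String) : String := PySem.Str.lower (PySem.Str.stripChars w ".,!?;:")
-- target.strip().lower()
def pvNormTarget (t : String) : String := PySem.Str.lower (PySem.Str.strip t)
-- [tok for tok, _ in counter.most_common(10)]  (most_common(n) = sorted(items, key=count, reverse=True)[:n], stable)
def pvMostCommon10 (c : PySem.Dict String Int) : List String :=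
  ((PySem.List.sorted c.items (fun p => p.2) true).take 10).map (·.1)

-- inner 'for target in target_tokens' loop of A
def pvATargetLoop (target_tokens : List String) (words : List String) (i : Int) (normalized : String)
    (tc : PySem.Dict String (PySem.Dict String Int × PySem.Dict String Int)) :
    PySem.Dict String (PySem.Dict String Int × PySem.Dict String Int) :=
  target_tokens.foldl (fun tc target =>
    if normalized == pvNormTarget target then
      let tc :=
        if 0 < i then
          let prev_word := pvNormWord (PySem.List.pyGetD words (i - 1) "")
          tc.modify target (PySem.Dict.empty, PySem.Dict.empty)
            (fun c => (c.1.modify prev_word 0 (· + 1), c.2))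
        else tc
      if i < (words.length : Int) - 1 then
        let next_word := pvNormWord (PySem.List.pyGetD words (i + 1) "")
        tc.modify target (PySem.Dict.empty, PySem.Dict.empty)
          (fun c => (c.1, c.2.modify next_word 0 (· + 1)))
      else tc
    else tc) tc

-- 'for text in reasoning_texts' body of A
def pvATextLoop (target_tokens : List String)
    (tc : PySem.Dict String (PySem.Dict String Int × PySem.Dict String Int)) (text : String) :
    PySem.Dict String (PySem.Dict String Int × PySem.Dict String Int) :=
  let words := PySem.Str.split₀ text
  (PySem.List.enumerate words).foldl
    (fun tc iw => pvATargetLoop target_tokens words iw.1 (pvNormWord iw.2) tc) tc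

def get_token_sequences_from_reasoning_texts (reasoning_texts : List String) (target_tokens : List String) : List (String × List (String × List String)) :=
  let _target_set := PySem.Set.ofList (target_tokens.map pvNormTarget)  -- computed and unused, as in A
  let tc0 : PySem.Dict String (PySem.Dict String Int × PySem.Dict String Int) :=
    target_tokens.foldl (fun d token => d.insert token (PySem.Dict.empty, PySem.Dict.empty)) PySem.Dict.empty
  let tc := reasoning_texts.foldl (pvATextLoop target_tokens) tc0
  let result : PySem.Dict String (List (String × List String)) :=
    target_tokens.foldl (fun r token =>
      -- token_contexts[token]: token is always a key here, so the plain [] lookup is this getD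
      let c := tc.getD token (PySem.Dict.empty, PySem.Dict.empty)
      r.insert token [("before", pvMostCommon10 c.1), ("after", pvMostCommon10 c.2)]) PySem.Dict.empty
  result.items

-- ===== PORT B =====
-- one text's contribution to the global bigram Counter: bigrams.update(zip(nws, nws[1:]))
def pvBigramText (bg : PySem.Dict (String × String) Int) (text : String) :
    PySem.Dict (String × String) Int :=
  let nws := (PySem.Str.split₀ text).map pvNormWord
  (nws.zip (PySem.List.slice nws (some 1) none)).foldl (fun bg p => bg.modify p 0 (· + 1)) bg

-- Counter({l: c for (l, r), c in bigrams.items() if r == nf})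
def pvExtractBefore (bg : PySem.Dict (String × String) Int) (nf : String) : PySem.Dict String Int :=
  bg.items.foldl (fun d p => if p.1.2 == nf then d.insert p.1.1 p.2 else d) PySem.Dict.empty

-- Counter({r: c for (l, r), c in bigrams.items() if l == nf})
def pvExtractAfter (bg : PySem.Dict (String × String) Int) (nf : String) : PySem.Dict String Int :=
  bg.items.foldl (fun d p => if p.1.1 == nf then d.insert p.1.2 p.2 else d) PySem.Dict.empty

def get_token_sequences_from_reasoning_texts_alt (reasoning_texts : List String) (target_tokens : List String) : List (String × List (String × List String)) :=
  let bigrams := reasoning_texts.foldl pvBigramText PySem.Dict.empty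
  let result : PySem.Dict String (List (String × List String)) :=
    target_tokens.foldl (fun r token =>
      let nf := pvNormTarget token
      r.insert token [("before", pvMostCommon10 (pvExtractBefore bigrams nf)),
                      ("after", pvMostCommon10 (pvExtractAfter bigrams nf))]) PySem.Dict.empty
  result.items

-- ===== PRECONDITION & SPEC =====
def Spec_get_token_sequences_from_reasoning_texts (reasoning_texts : List String) (target_tokens : List String) (out : List (String × List (String × List String))) : Prop := out = get_token_sequences_from_reasoning_texts_alt reasoning_texts target_tokens
instance (reasoning_texts : List String) (target_tokens : List String) (out : List (String × List (String × List String))) : Decidable (Spec_get_token_sequences_from_reasoning_texts reasoning_texts target_tokens out) := by unfold Spec_get_token_sequences_from_reasoning_texts; infer_instance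

-- ===== CLAIM (what is proved, stated in full; the proofs are below) =====
def Claim_equal_get_token_sequences_from_reasoning_texts : Prop := ∀ (reasoning_texts : List String) (target_tokens : List String), Dom_get_token_sequences_from_reasoning_texts reasoning_texts target_tokens → Spec_get_token_sequences_from_reasoning_texts reasoning_texts target_tokens (get_token_sequences_from_reasoning_texts reasoning_texts target_tokens)

-- ===== LEMMAS AND PROOFS =====

-- GHOST intermediate program (proof-only): A's loop shape with per-target neighbour LISTS
-- instead of counters; it bridges A's counter state to B's bigram table.
def pvGhostNormMap (target_tokens : List String) : PySem.Dict String (List String) :=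
  target_tokens.foldl (fun d t => d.modify (pvNormTarget t) [] (· ++ [t])) PySem.Dict.empty

def pvGhostMatch (ts : List String) (nws : List String) (i : Int)
    (st : PySem.Dict String (List String) × PySem.Dict String (List String)) :
    PySem.Dict String (List String) × PySem.Dict String (List String) :=
  ts.foldl (fun st t =>
    let st :=
      if 0 < i then (st.1.modify t [] (· ++ [PySem.List.pyGetD nws (i - 1) ""]), st.2)
      else st
    if i < (nws.length : Int) - 1 then
      (st.1, st.2.modify t [] (· ++ [PySem.List.pyGetD nws (i + 1) ""]))
    else st) st

def pvGhostText (nm : PySem.Dict String (List String))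
    (st : PySem.Dict String (List String) × PySem.Dict String (List String)) (text : String) :
    PySem.Dict String (List String) × PySem.Dict String (List String) :=
  let nws := (PySem.Str.split₀ text).map pvNormWord
  (PySem.List.enumerate nws).foldl
    (fun st iw => pvGhostMatch (nm.getD iw.2 []) nws iw.1 st) st

-- the invariant tying A's counter state to the ghost's neighbour-list state, at every key
def pvInv (tc : PySem.Dict String (PySem.Dict String Int × PySem.Dict String Int))
    (st : PySem.Dict String (List String) × PySem.Dict String (List String)) : Prop :=
  ∀ t : String, tc.getD t (PySem.Dict.empty, PySem.Dict.empty)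
    = (PySem.Dict.counter (st.1.getD t []), PySem.Dict.counter (st.2.getD t []))

-- norm_map.get(nw, ()) is exactly the targets whose normalization is nw, in order
theorem pvGhostNormMap_getD (target_tokens : List String) (nw : String) :
    (pvGhostNormMap target_tokens).getD nw []
      = target_tokens.filter (fun t => pvNormTarget t == nw) := by
  have h : (target_tokens.map (fun t => (pvNormTarget t, t))).foldl
      (fun (d : PySem.Dict String (List String)) p => d.modify p.1 [] (· ++ [p.2])) PySem.Dict.empty
      = target_tokens.foldl (fun d t => d.modify (pvNormTarget t) [] (· ++ [t])) PySem.Dict.empty := by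
    rw [List.foldl_map]
  rw [pvGhostNormMap, ← h, PySem.Dict.getD_foldl_modify_append]
  simp [List.filter_map, Function.comp_def]

theorem pvNormWord_empty : pvNormWord "" = "" := by decide

theorem pvGetD_nws (words : List String) (j : Int) :
    PySem.List.pyGetD (words.map pvNormWord) j "" = pvNormWord (PySem.List.pyGetD words j "") := by
  have h := PySem.List.pyGetD_map pvNormWord words j ""
  rw [pvNormWord_empty] at h
  exact h

-- one matching target: A's two counter bumps versus the ghost's two list appends
theorem pvInv_step (i L : Int) (p n target : String) (tc) (st) (h : pvInv tc st) :
    pvInv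
      ((fun tc =>
        let tc := if 0 < i then tc.modify target (PySem.Dict.empty, PySem.Dict.empty)
            (fun c => (c.1.modify p 0 (· + 1), c.2)) else tc
        if i < L - 1 then tc.modify target (PySem.Dict.empty, PySem.Dict.empty)
            (fun c => (c.1, c.2.modify n 0 (· + 1))) else tc) tc)
      ((fun st =>
        let st := if 0 < i then (st.1.modify target [] (· ++ [p]), st.2) else st
        if i < L - 1 then (st.1, st.2.modify target [] (· ++ [n])) else st) st) := by
  intro t
  by_cases ht : t = target <;>
    simp only [] <;> split_ifs with h1 h2 <;>
    simp [PySem.Dict.getD_modify, ht, h t, h target, PySem.Dict.counter_append_singleton]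

-- fold of pvInv_step over any list of matching targets
theorem pvInv_matchFold (m : List String) (i L : Int) (p n : String) :
    ∀ (tc) (st), pvInv tc st →
    pvInv
      (m.foldl (fun tc target =>
        let tc := if 0 < i then tc.modify target (PySem.Dict.empty, PySem.Dict.empty)
            (fun c => (c.1.modify p 0 (· + 1), c.2)) else tc
        if i < L - 1 then tc.modify target (PySem.Dict.empty, PySem.Dict.empty)
            (fun c => (c.1, c.2.modify n 0 (· + 1))) else tc) tc)
      (m.foldl (fun st target =>
        let st := if 0 < i then (st.1.modify target [] (· ++ [p]), st.2) else st
        if i < L - 1 then (st.1, st.2.modify target [] (· ++ [n])) else st) st) := by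
  induction m with
  | nil => intro tc st h; exact h
  | cons x xs ih =>
    intro tc st h
    exact ih _ _ (pvInv_step i L p n x tc st h)

-- A's guarded scan over all targets is the unguarded scan over the matching ones
theorem pvATargetLoop_eq_filter (target_tokens words : List String) (i : Int) (nw : String) (tc) :
    pvATargetLoop target_tokens words i nw tc
      = (target_tokens.filter (fun t => pvNormTarget t == nw)).foldl (fun tc target =>
          let tc :=
            if 0 < i then
              tc.modify target (PySem.Dict.empty, PySem.Dict.empty)
                (fun c => (c.1.modify (pvNormWord (PySem.List.pyGetD words (i - 1) "")) 0 (· + 1), c.2))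
            else tc
          if i < (words.length : Int) - 1 then
            tc.modify target (PySem.Dict.empty, PySem.Dict.empty)
              (fun c => (c.1, c.2.modify (pvNormWord (PySem.List.pyGetD words (i + 1) "")) 0 (· + 1)))
          else tc) tc := by
  rw [pvATargetLoop, List.foldl_filter]
  refine PySem.List.foldl_congr_mem _ _ _ _ ?_
  intro acc x _
  by_cases hx : nw = pvNormTarget x
  · simp [hx]
  · simp [hx, Ne.symm hx]

-- one word of the corpus preserves the invariant
theorem pvInv_word (target_tokens words : List String) (i : Int) (w : String) (tc) (st)
    (h : pvInv tc st) :
    pvInv (pvATargetLoop target_tokens words i (pvNormWord w) tc)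
          (pvGhostMatch ((pvGhostNormMap target_tokens).getD (pvNormWord w) []) (words.map pvNormWord) i st) := by
  rw [pvATargetLoop_eq_filter, pvGhostNormMap_getD, pvGhostMatch]
  have hb : ∀ (st : PySem.Dict String (List String) × PySem.Dict String (List String))
      (t : String),
      (fun st t =>
        let st := if 0 < i then (st.1.modify t [] (· ++ [PySem.List.pyGetD (words.map pvNormWord) (i - 1) ""]), st.2) else st
        if i < ((words.map pvNormWord).length : Int) - 1 then
          (st.1, st.2.modify t [] (· ++ [PySem.List.pyGetD (words.map pvNormWord) (i + 1) ""]))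
        else st) st t
      = (fun st t =>
        let st := if 0 < i then (st.1.modify t [] (· ++ [pvNormWord (PySem.List.pyGetD words (i - 1) "")]), st.2) else st
        if i < (words.length : Int) - 1 then
          (st.1, st.2.modify t [] (· ++ [pvNormWord (PySem.List.pyGetD words (i + 1) "")]))
        else st) st t := by
    intro st t
    simp [pvGetD_nws]
  rw [PySem.List.foldl_congr_mem _ _ _ _ (fun acc x _ => hb acc x)]
  exact pvInv_matchFold _ i (words.length : Int)
    (pvNormWord (PySem.List.pyGetD words (i - 1) ""))
    (pvNormWord (PySem.List.pyGetD words (i + 1) "")) tc st h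

-- the enumerate loop over one text's words preserves the invariant
theorem pvInv_enumFold (target_tokens words : List String) (ws : List String) :
    ∀ (s : Int) (tc) (st), pvInv tc st →
    pvInv ((PySem.List.enumerate ws s).foldl
            (fun tc iw => pvATargetLoop target_tokens words iw.1 (pvNormWord iw.2) tc) tc)
          ((PySem.List.enumerate (ws.map pvNormWord) s).foldl
            (fun st iw => pvGhostMatch ((pvGhostNormMap target_tokens).getD iw.2 []) (words.map pvNormWord) iw.1 st) st) := by
  induction ws with
  | nil => intro s tc st h; simpa [PySem.List.enumerate_nil] using h
  | cons x xs ih =>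
    intro s tc st h
    simp only [List.map_cons, PySem.List.enumerate_cons, List.foldl_cons]
    exact ih (s + 1) _ _ (pvInv_word target_tokens words s x tc st h)

-- one text preserves the invariant
theorem pvInv_text (target_tokens : List String) (tc) (st) (text : String)
    (h : pvInv tc st) :
    pvInv (pvATextLoop target_tokens tc text) (pvGhostText (pvGhostNormMap target_tokens) st text) := by
  exact pvInv_enumFold target_tokens (PySem.Str.split₀ text) (PySem.Str.split₀ text) 0 tc st h

-- the whole corpus preserves the invariant
theorem pvInv_texts (target_tokens : List String) (reasoning_texts : List String) :
    ∀ (tc) (st), pvInv tc st →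
    pvInv (reasoning_texts.foldl (pvATextLoop target_tokens) tc)
          (reasoning_texts.foldl (pvGhostText (pvGhostNormMap target_tokens)) st) := by
  induction reasoning_texts with
  | nil => intro tc st h; exact h
  | cons x xs ih =>
    intro tc st h
    exact ih _ _ (pvInv_text target_tokens tc st x h)

-- a fold inserting one constant value leaves every getD at that value
theorem pvGetD_foldl_insert_const {ν : Type} (l : List String) (c : ν) :
    ∀ (d : PySem.Dict String ν), (∀ t, d.getD t c = c) →
    ∀ t, (l.foldl (fun d x => d.insert x c) d).getD t c = c := by
  induction l with
  | nil => intro d h t; exact h t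
  | cons x xs ih =>
    intro d h t
    refine ih _ (fun t' => ?_) t
    rw [PySem.Dict.getD_insert]
    split <;> simp [h t']

-- the initial states satisfy the invariant
theorem pvInv_init (target_tokens : List String) :
    pvInv (target_tokens.foldl (fun d token => d.insert token (PySem.Dict.empty, PySem.Dict.empty)) PySem.Dict.empty)
          (target_tokens.foldl (fun d t => d.insert t ([] : List String)) PySem.Dict.empty,
           target_tokens.foldl (fun d t => d.insert t ([] : List String)) PySem.Dict.empty) := by
  intro t
  rw [pvGetD_foldl_insert_const target_tokens _ _ (fun t' => PySem.Dict.getD_empty _ _) t]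
  rw [pvGetD_foldl_insert_const target_tokens _ _ (fun t' => PySem.Dict.getD_empty _ _) t]
  rfl

-- ---- ghost state as a function of the bigram stream ----

-- each neighbour event appends the neighbour once per occurrence of the target string
def pvRep (k : Nat) (l : List String) : List String := l.flatMap (fun w => List.replicate k w)

-- before-neighbours of normal form n in a word suffix, given the preceding word (if any)
def pvBefList (p? : Option String) (rest : List String) (n : String) : List String :=
  let pairs : List (String × String) :=
    match p? with
    | some p => (p :: rest).zip rest
    | none => rest.zip rest.tail
  (pairs.filter (fun q => q.2 == n)).map (·.1)

-- after-neighbours of normal form n in a word suffix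
def pvAftList (rest : List String) (n : String) : List String :=
  ((rest.zip rest.tail).filter (fun q => q.1 == n)).map (·.2)

-- adjacent normalized word pairs of one text / of the whole corpus
def pvPairsOf (text : String) : List (String × String) :=
  let nws := (PySem.Str.split₀ text).map pvNormWord
  nws.zip nws.tail

def pvAllPairs (reasoning_texts : List String) : List (String × String) :=
  reasoning_texts.flatMap pvPairsOf

theorem pvRep_append (k : Nat) (a b : List String) : pvRep k (a ++ b) = pvRep k a ++ pvRep k b := by
  simp [pvRep]

theorem pvRep_singleton (k : Nat) (w : String) : pvRep k [w] = List.replicate k w := by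
  simp [pvRep]

theorem pvRep_nil (k : Nat) : pvRep k [] = [] := rfl

theorem pvBefList_none_cons (x : String) (xs : List String) (n : String) :
    pvBefList none (x :: xs) n = pvBefList (some x) xs n := rfl

theorem pvBefList_some_cons (p x : String) (xs : List String) (n : String) :
    pvBefList (some p) (x :: xs) n
      = (if x = n then [p] else []) ++ pvBefList (some x) xs n := by
  simp only [pvBefList, List.zip_cons_cons, List.filter_cons]
  by_cases h : x = n <;> simp [h]

theorem pvBefList_nil (p? : Option String) (n : String) : pvBefList p? [] n = [] := by
  cases p? <;> rfl

theorem pvAftList_nil (n : String) : pvAftList [] n = [] := rfl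

theorem pvAftList_single (x n : String) : pvAftList [x] n = [] := rfl

theorem pvAftList_cons_cons (x y : String) (ys : List String) (n : String) :
    pvAftList (x :: y :: ys) n = (if x = n then [y] else []) ++ pvAftList (y :: ys) n := by
  simp only [pvAftList, List.zip_cons_cons, List.tail_cons, List.filter_cons]
  by_cases h : x = n <;> simp [h]

-- generic effect of the ghost's per-match fold on one key
theorem pvReplComm (n : Nat) (w : String) : w :: List.replicate n w = List.replicate n w ++ [w] := by
  rw [← List.replicate_succ, List.replicate_succ']

theorem pvFoldPair_getD (c1 c2 : Prop) [Decidable c1] [Decidable c2] (w1 w2 : String)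
    (t : String) (ts : List String) :
    ∀ st : PySem.Dict String (List String) × PySem.Dict String (List String),
    ((ts.foldl (fun st x =>
        let st := if c1 then (st.1.modify x [] (· ++ [w1]), st.2) else st
        if c2 then (st.1, st.2.modify x [] (· ++ [w2])) else st) st).1.getD t []
      = st.1.getD t [] ++ (if c1 then List.replicate (ts.count t) w1 else []))
    ∧ ((ts.foldl (fun st x =>
        let st := if c1 then (st.1.modify x [] (· ++ [w1]), st.2) else st
        if c2 then (st.1, st.2.modify x [] (· ++ [w2])) else st) st).2.getD t []
      = st.2.getD t [] ++ (if c2 then List.replicate (ts.count t) w2 else [])) := by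
  induction ts with
  | nil => intro st; simp
  | cons x xs ih =>
    intro st
    simp only [List.foldl_cons]
    obtain ⟨ih1, ih2⟩ := ih
      ((fun st x =>
        let st := if c1 then (st.1.modify x [] (· ++ [w1]), st.2) else st
        if c2 then (st.1, st.2.modify x [] (· ++ [w2])) else st) st x)
    constructor
    · rw [ih1]
      by_cases h1 : c1 <;> by_cases h2 : c2 <;>
        by_cases ht : t = x <;>
        simp [h1, h2, PySem.Dict.getD_modify, ht, List.count_cons, pvReplComm,
              List.append_assoc, ← List.replicate_succ', eq_comm]
    · rw [ih2]
      by_cases h1 : c1 <;> by_cases h2 : c2 <;>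
        by_cases ht : t = x <;>
        simp [h1, h2, PySem.Dict.getD_modify, ht, List.count_cons, pvReplComm,
              List.append_assoc, ← List.replicate_succ', eq_comm]
theorem pvGhostMatch_getD (ts nws : List String) (i : Int) (t : String) (st) :
    ((pvGhostMatch ts nws i st).1.getD t []
      = st.1.getD t [] ++ (if 0 < i then List.replicate (ts.count t) (PySem.List.pyGetD nws (i - 1) "") else []))
    ∧ ((pvGhostMatch ts nws i st).2.getD t []
      = st.2.getD t [] ++ (if i < (nws.length : Int) - 1 then List.replicate (ts.count t) (PySem.List.pyGetD nws (i + 1) "") else [])) :=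
  pvFoldPair_getD (0 < i) (i < (nws.length : Int) - 1)
    (PySem.List.pyGetD nws (i - 1) "") (PySem.List.pyGetD nws (i + 1) "") t ts st

-- count of one key in the matching-target list
theorem pvCountFilter (tts : List String) (t x : String) :
    ((tts.filter (fun t' => pvNormTarget t' == x)).count t)
      = if pvNormTarget t = x then tts.count t else 0 := by
  by_cases h : pvNormTarget t = x
  · rw [if_pos h, List.count_filter]; simp [h]
  · rw [if_neg h, List.count_eq_zero]
    simp [List.mem_filter, h]

theorem pvPrev_getD (pre' : List String) (p x : String) (xs : List String) :
    PySem.List.pyGetD ((pre' ++ [p]) ++ x :: xs) (((pre' ++ [p]).length : Int) - 1) "" = p := by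
  have h : (((pre' ++ [p]).length : Int) - 1) = ((pre'.length : Nat) : Int) := by
    simp
  rw [h, PySem.List.pyGetD_natCast]
  have h2 : (pre' ++ [p]) ++ x :: xs = pre' ++ p :: (x :: xs) := by simp
  rw [h2]
  simp [List.getD_eq_getElem?_getD, List.getElem?_append_right]
theorem pvNext_getD (pre : List String) (x y : String) (ys : List String) :
    PySem.List.pyGetD (pre ++ x :: y :: ys) ((pre.length : Int) + 1) "" = y := by
  have h : ((pre.length : Int) + 1) = ((pre.length + 1 : Nat) : Int) := by push_cast; ring
  rw [h, PySem.List.pyGetD_natCast]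
  simp [List.getD_eq_getElem?_getD, List.getElem?_append_right]

-- the ghost's enumerate loop, characterized on a suffix of the word list
theorem pvReplicate_ite (c : Prop) [Decidable c] (K : Nat) (w : String) :
    List.replicate (if c then K else 0) w = if c then List.replicate K w else [] := by
  split <;> simp

theorem pvGhostEnum (tts : List String) (t : String) :
    ∀ (rest pre : List String) (st : PySem.Dict String (List String) × PySem.Dict String (List String)),
    (((PySem.List.enumerate rest (pre.length : Int)).foldl
        (fun st iw => pvGhostMatch ((pvGhostNormMap tts).getD iw.2 []) (pre ++ rest) iw.1 st) st).1.getD t []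
      = st.1.getD t [] ++ pvRep (tts.count t) (pvBefList pre.getLast? rest (pvNormTarget t)))
    ∧ (((PySem.List.enumerate rest (pre.length : Int)).foldl
        (fun st iw => pvGhostMatch ((pvGhostNormMap tts).getD iw.2 []) (pre ++ rest) iw.1 st) st).2.getD t []
      = st.2.getD t [] ++ pvRep (tts.count t) (pvAftList rest (pvNormTarget t))) := by
  intro rest
  induction rest with
  | nil => intro pre st; simp [pvBefList_nil, pvAftList_nil, pvRep_nil]
  | cons x xs ih =>
    intro pre st
    simp only [PySem.List.enumerate_cons, List.foldl_cons]
    have hlen : ((pre ++ [x]).length : Int) = (pre.length : Int) + 1 := by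
      simp
    have happ : pre ++ x :: xs = (pre ++ [x]) ++ xs := by simp
    obtain ⟨e1, e2⟩ := ih (pre ++ [x])
      (pvGhostMatch ((pvGhostNormMap tts).getD x []) (pre ++ x :: xs) (pre.length : Int) st)
    rw [hlen, ← happ] at e1 e2
    rw [e1, e2]
    obtain ⟨m1, m2⟩ := pvGhostMatch_getD ((pvGhostNormMap tts).getD x []) (pre ++ x :: xs) (pre.length : Int) t st
    rw [pvGhostNormMap_getD] at m1 m2 ⊢
    rw [pvCountFilter] at m1 m2
    rw [m1, m2, List.getLast?_concat]
    constructor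
    · rcases List.eq_nil_or_concat pre with hpre | ⟨pre', p, hpre⟩
      · subst hpre
        simp [pvBefList_none_cons]
      · subst hpre
        simp only [List.concat_eq_append]
        have hc1 : (0 : Int) < ((pre' ++ [p]).length : Int) := by simp
        rw [if_pos hc1, pvPrev_getD, List.getLast?_concat, pvBefList_some_cons,
            pvRep_append, pvReplicate_ite]
        by_cases hx : pvNormTarget t = x
        · rw [if_pos hx, if_pos hx.symm, pvRep_singleton, List.append_assoc]
        · rw [if_neg hx, if_neg (fun hh => hx hh.symm)]
          simp [pvRep_nil]
    · cases xs with
      | nil =>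
        have hc2 : ¬ ((pre.length : Int) < ((pre ++ [x]).length : Int) - 1) := by
          simp
        rw [if_neg hc2]
        simp [pvAftList_single, pvAftList_nil, pvRep_nil]
      | cons y ys =>
        have hc2 : (pre.length : Int) < ((pre ++ x :: y :: ys).length : Int) - 1 := by
          push_cast [List.length_append, List.length_cons]; omega
        rw [if_pos hc2, pvNext_getD, pvAftList_cons_cons, pvRep_append, pvReplicate_ite]
        by_cases hx : pvNormTarget t = x
        · rw [if_pos hx, if_pos hx.symm, pvRep_singleton, List.append_assoc]
        · rw [if_neg hx, if_neg (fun hh => hx hh.symm)]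
          simp [pvRep_nil]
-- one text's effect on the ghost state
theorem pvGhostText_getD (tts : List String) (t : String) (st) (text : String) :
    ((pvGhostText (pvGhostNormMap tts) st text).1.getD t []
      = st.1.getD t [] ++ pvRep (tts.count t) (((pvPairsOf text).filter (fun q => q.2 == pvNormTarget t)).map (·.1)))
    ∧ ((pvGhostText (pvGhostNormMap tts) st text).2.getD t []
      = st.2.getD t [] ++ pvRep (tts.count t) (((pvPairsOf text).filter (fun q => q.1 == pvNormTarget t)).map (·.2))) := by
  have h := pvGhostEnum tts t ((PySem.Str.split₀ text).map pvNormWord) [] st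
  simpa [pvGhostText, pvPairsOf, pvBefList, pvAftList] using h

-- the whole corpus: the ghost's lists are the filtered bigram stream (with multiplicity)
theorem pvGhostCorpus (tts : List String) (t : String) :
    ∀ (rts : List String) (st),
    (((rts.foldl (pvGhostText (pvGhostNormMap tts)) st).1.getD t []
      = st.1.getD t [] ++ pvRep (tts.count t) (((pvAllPairs rts).filter (fun q => q.2 == pvNormTarget t)).map (·.1))))
    ∧ (((rts.foldl (pvGhostText (pvGhostNormMap tts)) st).2.getD t []
      = st.2.getD t [] ++ pvRep (tts.count t) (((pvAllPairs rts).filter (fun q => q.1 == pvNormTarget t)).map (·.2)))) := by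
  intro rts
  induction rts with
  | nil => intro st; simp [pvAllPairs, pvRep_nil]
  | cons tx rts ih =>
    intro st
    simp only [List.foldl_cons]
    obtain ⟨e1, e2⟩ := ih (pvGhostText (pvGhostNormMap tts) st tx)
    obtain ⟨f1, f2⟩ := pvGhostText_getD tts t st tx
    rw [e1, e2, f1, f2]
    constructor <;>
      simp [pvAllPairs, List.filter_append, pvRep_append, List.append_assoc]

-- ---- B side: the extraction phase, characterized ----

theorem pvBigrams_eq (rts : List String) :
    rts.foldl pvBigramText PySem.Dict.empty = PySem.Dict.counter (pvAllPairs rts) := by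
  have hbody : ∀ (bg : PySem.Dict (String × String) Int) (tx : String),
      pvBigramText bg tx = (pvPairsOf tx).foldl (fun bg p => bg.modify p 0 (· + 1)) bg := by
    intro bg tx
    simp [pvBigramText, pvPairsOf, PySem.List.slice_from_one]
  rw [PySem.Dict.counter, pvAllPairs, List.foldl_flatMap]
  exact (PySem.List.foldl_congr_mem _ _ _ _ (fun acc x _ => hbody acc x))

-- distinct first components among pairs sharing the second component
theorem pvExtract_items_gen (L : List (String × String)) (cnt : String × String → Int)
    (nf : String) (hL : L.Nodup) (hsnd : ∀ q ∈ L, q.2 == nf)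
    (itemsIn : List ((String × String) × Int)) (hin : itemsIn = L.map (fun q => (q, cnt q))) :
    (itemsIn.foldl (fun d p => d.insert p.1.1 p.2) (PySem.Dict.empty : PySem.Dict String Int)).items
      = L.map (fun q => (q.1, cnt q)) := by
  subst hin
  rw [List.foldl_map]
  have hnd : (L.map (fun q => q.1)).Nodup := by
    refine List.Nodup.map_on ?_ hL
    intro q hq q' hq' hfst
    have h2 : q.2 = nf := by simpa using hsnd q hq
    have h2' : q'.2 = nf := by simpa using hsnd q' hq'
    exact Prod.ext hfst (h2.trans h2'.symm)
  have h := PySem.Dict.items_foldl_insert_fresh (ν := Int) L (fun q => q.1) (fun q => cnt q)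
      PySem.Dict.empty (fun a _ => by simp) hnd
  simpa using h

theorem pvExtract_items_gen2 (L : List (String × String)) (cnt : String × String → Int)
    (nf : String) (hL : L.Nodup) (hfst : ∀ q ∈ L, q.1 == nf)
    (itemsIn : List ((String × String) × Int)) (hin : itemsIn = L.map (fun q => (q, cnt q))) :
    (itemsIn.foldl (fun d p => d.insert p.1.2 p.2) (PySem.Dict.empty : PySem.Dict String Int)).items
      = L.map (fun q => (q.2, cnt q)) := by
  subst hin
  rw [List.foldl_map]
  have hnd : (L.map (fun q => q.2)).Nodup := by
    refine List.Nodup.map_on ?_ hL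
    intro q hq q' hq' hsnd
    have h1 : q.1 = nf := by simpa using hfst q hq
    have h1' : q'.1 = nf := by simpa using hfst q' hq'
    exact Prod.ext (h1.trans h1'.symm) hsnd
  have h := PySem.Dict.items_foldl_insert_fresh (ν := Int) L (fun q => q.2) (fun q => cnt q)
      PySem.Dict.empty (fun a _ => by simp) hnd
  simpa using h

theorem pvExtractBefore_items (ps : List (String × String)) (nf : String) :
    (pvExtractBefore (PySem.Dict.counter ps) nf).items
      = (((PySem.Set.ofList ps).filter (fun q => q.2 == nf)).map (fun q => (q.1, (ps.count q : Int)))) := by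
  have hfold := PySem.List.foldl_if_eq_foldl_filter
      (fun (p : (String × String) × Int) => p.1.2 == nf)
      (fun (d : PySem.Dict String Int) (p : (String × String) × Int) => d.insert p.1.1 p.2)
      (PySem.Dict.counter ps).items PySem.Dict.empty
  rw [pvExtractBefore, hfold, PySem.Dict.items_counter, List.filter_map]
  have hcomp : ((fun (p : (String × String) × Int) => p.1.2 == nf)
      ∘ fun (k : String × String) => (k, (ps.count k : Int))) = fun q => q.2 == nf := by
    funext q; simp
  rw [hcomp]
  exact pvExtract_items_gen ((PySem.Set.ofList ps).filter (fun q => q.2 == nf))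
    (fun q => (ps.count q : Int)) nf
    ((PySem.Set.nodup_ofList ps).filter _)
    (fun q hq => (List.mem_filter.mp hq).2)
    _ rfl

theorem pvExtractAfter_items (ps : List (String × String)) (nf : String) :
    (pvExtractAfter (PySem.Dict.counter ps) nf).items
      = (((PySem.Set.ofList ps).filter (fun q => q.1 == nf)).map (fun q => (q.2, (ps.count q : Int)))) := by
  have hfold := PySem.List.foldl_if_eq_foldl_filter
      (fun (p : (String × String) × Int) => p.1.1 == nf)
      (fun (d : PySem.Dict String Int) (p : (String × String) × Int) => d.insert p.1.2 p.2)
      (PySem.Dict.counter ps).items PySem.Dict.empty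
  rw [pvExtractAfter, hfold, PySem.Dict.items_counter, List.filter_map]
  have hcomp : ((fun (p : (String × String) × Int) => p.1.1 == nf)
      ∘ fun (k : String × String) => (k, (ps.count k : Int))) = fun q => q.1 == nf := by
    funext q; simp
  rw [hcomp]
  exact pvExtract_items_gen2 ((PySem.Set.ofList ps).filter (fun q => q.1 == nf))
    (fun q => (ps.count q : Int)) nf
    ((PySem.Set.nodup_ofList ps).filter _)
    (fun q hq => (List.mem_filter.mp hq).2)
    _ rfl

-- ---- Set.ofList rewriting lemmas ----

theorem pvSetOfList_filter {α : Type} [BEq α] [LawfulBEq α] (f : α → Bool) (l : List α) :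
    PySem.Set.ofList (l.filter f) = (PySem.Set.ofList l).filter f := by
  induction l with
  | nil => rfl
  | cons x xs ih =>
    rw [PySem.Set.ofList_cons, List.filter_cons]
    by_cases hx : f x
    · rw [if_pos hx, PySem.Set.ofList_cons, ih, List.filter_cons, if_pos hx]
      congr 1
      simp only [PySem.Set.discard, List.filter_filter]
      refine List.filter_congr ?_
      intro a _
      rw [Bool.and_comm]
    · rw [if_neg hx, ih, List.filter_cons, if_neg hx]
      simp only [PySem.Set.discard, List.filter_filter]
      refine (List.filter_congr ?_).symm
      intro a _
      by_cases hax : a = x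
      · subst hax; simp [hx]
      · simp [hax]

theorem pvSetOfList_map_inj {α β : Type} [BEq α] [LawfulBEq α] [BEq β] [LawfulBEq β]
    (g : α → β) (hg : Function.Injective g) (l : List α) :
    PySem.Set.ofList (l.map g) = (PySem.Set.ofList l).map g := by
  induction l with
  | nil => rfl
  | cons x xs ih =>
    rw [List.map_cons, PySem.Set.ofList_cons, PySem.Set.ofList_cons, ih, List.map_cons]
    congr 1
    simp only [PySem.Set.discard, List.filter_map]
    refine congrArg (List.map g) (List.filter_congr ?_)
    intro a _
    simp [Function.comp_def, hg.eq_iff]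

-- a filtered pair list with constant second component is a map of its first components
theorem pvPairs_eq_map {α : Type} (l : List (α × α)) (nf : α) (h : ∀ q ∈ l, q.2 = nf) :
    l = (l.map (·.1)).map (fun a => (a, nf)) := by
  rw [List.map_map]
  conv_lhs => rw [← List.map_id l]
  exact (List.map_congr_left (fun q hq => by
    have := h q hq
    simp [Function.comp_def, ← this])).symm

-- ---- counting with multiplicity ----

theorem pvCount_rep (l : List String) (K : Nat) (v : String) :
    (pvRep K l).count v = K * l.count v := by
  induction l with
  | nil => simp [pvRep]
  | cons x xs ih =>
    rw [pvRep, List.flatMap_cons, ← pvRep, List.count_append, ih, List.count_cons,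
        List.count_replicate]
    by_cases h : x = v <;> simp [h, Nat.mul_add, Nat.mul_comm] <;> ring

theorem pvUpdate_replicate (x : String) (K : Nat) (hK : 1 ≤ K) :
    ∀ s : PySem.Set String, PySem.Set.update s (List.replicate K x) = PySem.Set.add s x := by
  induction K with
  | zero => omega
  | succ K ih =>
    intro s
    rw [List.replicate_succ, PySem.Set.update_cons]
    by_cases hK0 : 1 ≤ K
    · rw [ih hK0 (s.add x)]
      exact PySem.Set.add_of_mem (by rw [PySem.Set.mem_add]; right; rfl)
    · have : K = 0 := by omega
      subst this
      rfl

theorem pvSetOfList_rep (l : List String) (K : Nat) (hK : 1 ≤ K) :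
    PySem.Set.ofList (pvRep K l) = PySem.Set.ofList l := by
  have h : ∀ s : PySem.Set String, PySem.Set.update s (pvRep K l) = PySem.Set.update s l := by
    induction l with
    | nil => intro s; rfl
    | cons x xs ih =>
      intro s
      rw [pvRep, List.flatMap_cons, ← pvRep, PySem.Set.update_append,
          pvUpdate_replicate x K hK, PySem.Set.update_cons, ih]
  have h0 := h []
  simpa [PySem.Set.update_empty] using h0

theorem pvCounterRep_items (l : List String) (K : Nat) (hK : 1 ≤ K) :
    (PySem.Dict.counter (pvRep K l)).items
      = (PySem.Set.ofList l).map (fun v => (v, ((K : Int) * (l.count v : Int)))) := by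
  rw [PySem.Dict.items_counter, pvSetOfList_rep l K hK]
  refine List.map_congr_left (fun v _ => ?_)
  rw [pvCount_rep]
  push_cast
  ring_nf

-- ---- canonical form of both sides' per-target dicts ----

-- B's extraction, as a map over the deduplicated neighbour list
theorem pvExtractBefore_canon (ps : List (String × String)) (nf : String) :
    (pvExtractBefore (PySem.Dict.counter ps) nf).items
      = (PySem.Set.ofList ((ps.filter (fun q => q.2 == nf)).map (·.1))).map
          (fun a => (a, (((ps.filter (fun q => q.2 == nf)).map (·.1)).count a : Int))) := by
  rw [pvExtractBefore_items, ← pvSetOfList_filter]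
  have hsnd : ∀ q ∈ ps.filter (fun q => q.2 == nf), q.2 = nf := by
    intro q hq; simpa using List.of_mem_filter hq
  have hinj : Function.Injective (fun a : String => (a, nf)) := by
    intro a b h; simpa using h
  conv_lhs => rw [pvPairs_eq_map (ps.filter (fun q => q.2 == nf)) nf hsnd,
                  pvSetOfList_map_inj _ hinj]
  rw [List.map_map]
  refine List.map_congr_left (fun a ha => ?_)
  simp only [Function.comp_def]
  congr 1
  have h1 : ps.count (a, nf) = (ps.filter (fun q => q.2 == nf)).count (a, nf) := by
    rw [List.count_filter]; simp
  rw [h1]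
  conv_lhs => rw [pvPairs_eq_map (ps.filter (fun q => q.2 == nf)) nf hsnd]
  rw [List.count_map_of_injective _ _ hinj]

theorem pvExtractAfter_canon (ps : List (String × String)) (nf : String) :
    (pvExtractAfter (PySem.Dict.counter ps) nf).items
      = (PySem.Set.ofList ((ps.filter (fun q => q.1 == nf)).map (·.2))).map
          (fun a => (a, (((ps.filter (fun q => q.1 == nf)).map (·.2)).count a : Int))) := by
  rw [pvExtractAfter_items, ← pvSetOfList_filter]
  have hfst : ∀ q ∈ ps.filter (fun q => q.1 == nf), q.1 = nf := by
    intro q hq; simpa using List.of_mem_filter hq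
  have hinj : Function.Injective (fun a : String => (nf, a)) := by
    intro a b h; simpa using h
  have hpairs : ps.filter (fun q => q.1 == nf)
      = ((ps.filter (fun q => q.1 == nf)).map (·.2)).map (fun a => (nf, a)) := by
    rw [List.map_map]
    conv_lhs => rw [← List.map_id (ps.filter (fun q => q.1 == nf))]
    refine (List.map_congr_left (fun q hq => ?_)).symm
    have := hfst q hq
    simp [Function.comp_def, ← this]
  conv_lhs => rw [hpairs, pvSetOfList_map_inj _ hinj]
  rw [List.map_map]
  refine List.map_congr_left (fun a ha => ?_)
  simp only [Function.comp_def]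
  congr 1
  have h1 : ps.count (nf, a) = (ps.filter (fun q => q.1 == nf)).count (nf, a) := by
    rw [List.count_filter]; simp
  rw [h1]
  conv_lhs => rw [hpairs]
  rw [List.count_map_of_injective _ _ hinj]

-- ---- most_common(10) ignores a uniform positive scaling of the counts ----

theorem pvInsertBy_map {α β : Type} (g : α → β) (b1 : β → β → Bool) (b2 : α → α → Bool)
    (h : ∀ x y, b1 (g x) (g y) = b2 x y) (x : α) :
    ∀ ys : List α, PySem.List.insertBy b1 (g x) (ys.map g) = (PySem.List.insertBy b2 x ys).map g := by
  intro ys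
  induction ys with
  | nil => rfl
  | cons y ys ih =>
    rw [List.map_cons, PySem.List.insertBy, PySem.List.insertBy, h x y]
    by_cases hb : b2 x y
    · simp [hb]
    · simp [hb, ih]

theorem pvFoldl_insertBy_map {α β : Type} (g : α → β) (b1 : β → β → Bool) (b2 : α → α → Bool)
    (h : ∀ x y, b1 (g x) (g y) = b2 x y) :
    ∀ (xs : List α) (acc : List α),
    (xs.map g).foldl (fun acc x => PySem.List.insertBy b1 x acc) (acc.map g)
      = (xs.foldl (fun acc x => PySem.List.insertBy b2 x acc) acc).map g := by
  intro xs
  induction xs with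
  | nil => intro acc; rfl
  | cons x xs ih =>
    intro acc
    rw [List.map_cons, List.foldl_cons, List.foldl_cons, pvInsertBy_map g b1 b2 h x acc, ih]

theorem pvMostCommon10_scale (L : List String) (c : String → Int) (K : Int) (hK : 0 < K)
    (d d' : PySem.Dict String Int)
    (hd : d.items = L.map (fun a => (a, K * c a)))
    (hd' : d'.items = L.map (fun a => (a, c a))) :
    pvMostCommon10 d = pvMostCommon10 d' := by
  rw [pvMostCommon10, pvMostCommon10, hd, hd']
  have hmap : L.map (fun a => (a, K * c a))
      = (L.map (fun a => (a, c a))).map (fun p => (p.1, K * p.2)) := by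
    rw [List.map_map]
    simp [Function.comp_def]
  rw [hmap]
  have hcmp : ∀ x y : String × Int,
      (fun (a b : String × Int) => decide (b.2 < a.2))
        ((fun p : String × Int => (p.1, K * p.2)) x) ((fun p : String × Int => (p.1, K * p.2)) y)
      = (fun (a b : String × Int) => decide (b.2 < a.2)) x y := by
    intro x y
    show decide ((K * y.2) < (K * x.2)) = decide (y.2 < x.2)
    by_cases h : y.2 < x.2
    · rw [decide_eq_true h, decide_eq_true (mul_lt_mul_of_pos_left h hK)]
    · rw [decide_eq_false h,
          decide_eq_false (fun hc => h (lt_of_mul_lt_mul_left hc (le_of_lt hK)))]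
  rw [PySem.List.sorted_rev_eq_foldl_insertBy, PySem.List.sorted_rev_eq_foldl_insertBy]
  have hfold := pvFoldl_insertBy_map (fun p : String × Int => (p.1, K * p.2))
      (fun a b => decide (b.2 < a.2)) (fun a b => decide (b.2 < a.2)) hcmp
      (L.map (fun a => (a, c a))) []
  simp only [List.map_nil] at hfold
  rw [hfold, List.map_take, List.map_map]
  simp [Function.comp_def]

-- ---- assembling the per-token equality ----

theorem pvPerToken (rts tts : List String) (token : String) (htok : token ∈ tts) :
    (pvMostCommon10 ((rts.foldl (pvATextLoop tts)
        (tts.foldl (fun d token => d.insert token (PySem.Dict.empty, PySem.Dict.empty)) PySem.Dict.empty)).getD token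
        (PySem.Dict.empty, PySem.Dict.empty)).1
      = pvMostCommon10 (pvExtractBefore (rts.foldl pvBigramText PySem.Dict.empty) (pvNormTarget token)))
    ∧ (pvMostCommon10 ((rts.foldl (pvATextLoop tts)
        (tts.foldl (fun d token => d.insert token (PySem.Dict.empty, PySem.Dict.empty)) PySem.Dict.empty)).getD token
        (PySem.Dict.empty, PySem.Dict.empty)).2
      = pvMostCommon10 (pvExtractAfter (rts.foldl pvBigramText PySem.Dict.empty) (pvNormTarget token))) := by
  have hK : 1 ≤ tts.count token := List.count_pos_iff.mpr htok
  have hKint : (0 : Int) < (tts.count token : Int) := by exact_mod_cast hK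
  have hinv := pvInv_texts tts rts _ _ (pvInv_init tts) token
  obtain ⟨g1, g2⟩ := pvGhostCorpus tts token rts
    (tts.foldl (fun d t => d.insert t ([] : List String)) PySem.Dict.empty,
     tts.foldl (fun d t => d.insert t ([] : List String)) PySem.Dict.empty)
  rw [pvGetD_foldl_insert_const tts _ _ (fun t' => PySem.Dict.getD_empty _ _) token] at g1 g2
  rw [List.nil_append] at g1 g2
  rw [pvBigrams_eq]
  constructor
  · rw [hinv]
    simp only [g1]
    exact pvMostCommon10_scale
      (PySem.Set.ofList (((pvAllPairs rts).filter (fun q => q.2 == pvNormTarget token)).map (·.1)))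
      (fun a => ((((pvAllPairs rts).filter (fun q => q.2 == pvNormTarget token)).map (·.1)).count a : Int))
      (tts.count token : Int) hKint _ _
      (by rw [pvCounterRep_items _ _ hK])
      (pvExtractBefore_canon (pvAllPairs rts) (pvNormTarget token))
  · rw [hinv]
    simp only [g2]
    exact pvMostCommon10_scale
      (PySem.Set.ofList (((pvAllPairs rts).filter (fun q => q.1 == pvNormTarget token)).map (·.2)))
      (fun a => ((((pvAllPairs rts).filter (fun q => q.1 == pvNormTarget token)).map (·.2)).count a : Int))
      (tts.count token : Int) hKint _ _
      (by rw [pvCounterRep_items _ _ hK])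
      (pvExtractAfter_canon (pvAllPairs rts) (pvNormTarget token))

-- ===== VERDICT (by name: the statement is the Claim_ definition above) =====
theorem get_token_sequences_from_reasoning_texts_spec : Claim_equal_get_token_sequences_from_reasoning_texts := by
  intro reasoning_texts target_tokens _
  show _ = _
  rw [get_token_sequences_from_reasoning_texts, get_token_sequences_from_reasoning_texts_alt]
  simp only []
  congr 1
  refine PySem.List.foldl_congr_mem _ _ _ _ ?_
  intro acc token htok
  obtain ⟨h1, h2⟩ := pvPerToken reasoning_texts target_tokens token htok
  rw [h1, h2]
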